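-- pv_equiv track=rewrite | github.com/waitblock/Competitive-Programming | ACSL/2020-21_acslmultiplearrays.py | sumOfLargest
-- ===== SOURCE A (Python) =====
-- def sumOfLargest(a1, a2, a3):
--     a1_ints = []
--     for e in a1.split(" "):
--         try:
--             a1_ints.append(int(e))
--         except:
--             pass
--     a2_ints = []
--     for e in a2.split(" "):
--         try:
--             a2_ints.append(int(e))
--         except:
--             pass
--     a3_ints = []
--     for e in a3.split(" "):
--         try:
--             a3_ints.append(int(e))
--         except:
--             pass
--     big_array = []
--
--     total = 0
--
--     for i in range(max(len(a1_ints),len(a2_ints),len(a3_ints))):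
--         array_to_add = []
--         try:
--             array_to_add.append(a1_ints[i])
--         except IndexError:
--             pass
--         try:
--             array_to_add.append(a2_ints[i])
--         except IndexError:
--             pass
--         try:
--             array_to_add.append(a3_ints[i])
--         except IndexError:
--             pass
--         big_array.append(array_to_add)
--
--     for e in big_array:
--         total += max(e)
--
--     return total
-- ===== SOURCE B (Python) =====
-- def sumOfLargest(a1, a2, a3):
--     def parse(s):
--         out = []
--         for tok in s.split(" "):
--             try:
--                 out.append(int(tok))
--             except ValueError:
--                 pass
--         return out
--
--     xs, ys, zs = parse(a1), parse(a2), parse(a3)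
--     total = 0
--     while xs or ys or zs:
--         best = None
--         for lst in (xs, ys, zs):
--             if lst:
--                 v = lst[0]
--                 if best is None or v > best:
--                     best = v
--         total += best
--         xs, ys, zs = xs[1:], ys[1:], zs[1:]
--     return total
-- ===== Notes on version B (the rewrite author's own statement) =====
-- stated objective: alternative
-- what changed: Replaced the index loop over range(max(len,...)) with try/except IndexError and the intermediate big_array of candidate lists by a head-consuming pass that repeatedly takes the max of the current first elements of the three lists and drops them, accumulating the total directly.
import Mathlib
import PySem

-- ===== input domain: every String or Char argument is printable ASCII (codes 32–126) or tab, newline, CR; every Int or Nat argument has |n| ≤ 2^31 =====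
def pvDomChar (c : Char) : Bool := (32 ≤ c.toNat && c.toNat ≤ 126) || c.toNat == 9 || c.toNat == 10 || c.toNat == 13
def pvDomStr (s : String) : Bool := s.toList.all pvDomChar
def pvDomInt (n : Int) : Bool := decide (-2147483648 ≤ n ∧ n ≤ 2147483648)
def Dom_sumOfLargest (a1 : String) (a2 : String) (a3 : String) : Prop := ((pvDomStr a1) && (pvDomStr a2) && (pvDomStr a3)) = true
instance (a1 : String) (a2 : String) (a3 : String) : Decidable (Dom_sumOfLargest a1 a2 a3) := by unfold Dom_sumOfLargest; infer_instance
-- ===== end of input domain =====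

-- B replaces A's index loop with try/except IndexError and the intermediate big_array by a
-- head-consuming pass over the three parsed lists (objective: alternative algorithm, same cost).

-- ===== PORT A =====
-- the 'for e in s.split(" "): try: append(int(e)) except: pass' loop (used three times in A)
def pvParse (s : String) : List Int :=
  ((PySem.Str.split? s " ").getD []).foldl
    (fun acc e => match PySem.Int.ofStr? e with
      | some n => acc ++ [n]
      | none => acc) []

def sumOfLargest (a1 : String) (a2 : String) (a3 : String) : Int :=
  let l1 := pvParse a1
  let l2 := pvParse a2
  let l3 := pvParse a3
  let big : List (List Int) :=
    (PySem.List.pyRange 0 (↑(max l1.length (max l2.length l3.length))) 1).foldl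
      (fun big i =>
        let t1 : List Int := match PySem.List.pyGet? l1 i with
          | some v => [] ++ [v]
          | none => []
        let t2 : List Int := match PySem.List.pyGet? l2 i with
          | some v => t1 ++ [v]
          | none => t1
        let t3 : List Int := match PySem.List.pyGet? l3 i with
          | some v => t2 ++ [v]
          | none => t2
        big ++ [t3]) []
  -- max(e): e is provably nonempty for every entry of big_array, so the getD 0 branch is dead
  big.foldl (fun total e => total + (PySem.List.max? e (fun x => x)).getD 0) 0

-- ===== PORT B =====
-- Source B's inner 'for lst in (xs, ys, zs): if lst: ...' best-of-heads fold
def pvBest (ls : List (List Int)) : Option Int :=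
  ls.foldl
    (fun best l =>
      match l with
      | [] => best
      | v :: _ =>
        match best with
        | none => some v
        | some b => if v > b then some v else best) none

-- Source B's while loop: pop the heads, add the best head, recurse on the tails
def pvSumHeads (xs ys zs : List Int) : Int :=
  if xs = [] ∧ ys = [] ∧ zs = [] then 0
  else ((pvBest [xs, ys, zs]).getD 0) + pvSumHeads xs.tail ys.tail zs.tail
termination_by xs.length + ys.length + zs.length
decreasing_by
  rcases xs with _ | ⟨x, xs⟩ <;> rcases ys with _ | ⟨y, ys⟩ <;> rcases zs with _ | ⟨z, zs⟩ <;>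
    simp_all <;> omega

def sumOfLargest_alt (a1 : String) (a2 : String) (a3 : String) : Int :=
  pvSumHeads (pvParse a1) (pvParse a2) (pvParse a3)

-- ===== PRECONDITION & SPEC =====
def Spec_sumOfLargest (a1 : String) (a2 : String) (a3 : String) (out : Int) : Prop := out = sumOfLargest_alt a1 a2 a3
instance (a1 : String) (a2 : String) (a3 : String) (out : Int) : Decidable (Spec_sumOfLargest a1 a2 a3 out) := by unfold Spec_sumOfLargest; infer_instance

-- ===== CLAIM (what is proved, stated in full; the proofs are below) =====
def Claim_equal_sumOfLargest : Prop := ∀ (a1 : String) (a2 : String) (a3 : String), Dom_sumOfLargest a1 a2 a3 → Spec_sumOfLargest a1 a2 a3 (sumOfLargest a1 a2 a3)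

-- ===== LEMMAS AND PROOFS =====


def cand3 (xs ys zs : List Int) (i : Int) : List Int :=
  let t1 : List Int := match PySem.List.pyGet? xs i with
    | some v => [] ++ [v]
    | none => []
  let t2 : List Int := match PySem.List.pyGet? ys i with
    | some v => t1 ++ [v]
    | none => t1
  match PySem.List.pyGet? zs i with
  | some v => t2 ++ [v]
  | none => t2

def Gmax (xs ys zs : List Int) (i : Int) : Int :=
  (PySem.List.max? (cand3 xs ys zs i) (fun x => x)).getD 0

theorem shift3 (xs ys zs : List Int) (k : Nat) :
    Gmax xs ys zs (↑(k+1)) = Gmax xs.tail ys.tail zs.tail (↑k) := by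
  simp only [Gmax, cand3, PySem.List.pyGet?_natCast, List.getElem?_tail]

theorem head3 (xs ys zs : List Int) (h : ¬ (xs = [] ∧ ys = [] ∧ zs = [])) :
    Gmax xs ys zs (↑(0:Nat)) = (pvBest [xs, ys, zs]).getD 0 := by
  rcases xs with _ | ⟨x, xs⟩ <;> rcases ys with _ | ⟨y, ys⟩ <;> rcases zs with _ | ⟨z, zs⟩ <;>
    simp_all [Gmax, cand3, pvBest, PySem.List.pyGet?_zero, PySem.List.max?_id_cons,
      max_def] <;> (try split_ifs) <;> (try simp_all) <;> (try split_ifs) <;> (try simp_all) <;>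
    omega

theorem main3 : ∀ (n : Nat) (xs ys zs : List Int),
    max xs.length (max ys.length zs.length) = n →
    ((List.range n).map (fun (k : Nat) => Gmax xs ys zs (↑k : Int))).sum = pvSumHeads xs ys zs := by
  intro n
  induction n with
  | zero =>
    intro xs ys zs h
    have hx : xs = [] := List.eq_nil_of_length_eq_zero (by omega)
    have hy : ys = [] := List.eq_nil_of_length_eq_zero (by omega)
    have hz : zs = [] := List.eq_nil_of_length_eq_zero (by omega)
    subst hx; subst hy; subst hz
    rw [pvSumHeads]
    simp
  | succ n ih =>
    intro xs ys zs h
    have hne : ¬ (xs = [] ∧ ys = [] ∧ zs = []) := by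
      rintro ⟨hx, hy, hz⟩; simp [hx, hy, hz] at h
    rw [List.range_succ_eq_map]
    simp only [List.map_cons, List.sum_cons, List.map_map, Function.comp_def]
    have hsh : ((List.range n).map (fun (k : Nat) => Gmax xs ys zs (↑(k+1) : Int)))
        = (List.range n).map (fun (k : Nat) => Gmax xs.tail ys.tail zs.tail (↑k : Int)) := by
      apply List.map_congr_left; intro k _; exact shift3 xs ys zs k
    rw [hsh, ih xs.tail ys.tail zs.tail (by
      rcases xs with _ | ⟨x, xs⟩ <;> rcases ys with _ | ⟨y, ys⟩ <;> rcases zs with _ | ⟨z, zs⟩ <;>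
        simp_all <;> omega)]
    rw [head3 xs ys zs hne]
    conv_rhs => rw [pvSumHeads]
    rw [if_neg hne]

theorem key_lemma (xs ys zs : List Int) :
    ((PySem.List.pyRange 0 (↑(max xs.length (max ys.length zs.length))) 1).foldl
      (fun big i =>
        let t1 : List Int := match PySem.List.pyGet? xs i with
          | some v => [] ++ [v]
          | none => []
        let t2 : List Int := match PySem.List.pyGet? ys i with
          | some v => t1 ++ [v]
          | none => t1
        let t3 : List Int := match PySem.List.pyGet? zs i with
          | some v => t2 ++ [v]
          | none => t2
        big ++ [t3]) []).foldl (fun total e => total + (PySem.List.max? e (fun x => x)).getD 0) 0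
    = pvSumHeads xs ys zs := by
  have h2 : ∀ (l : List (List Int)),
      l.foldl (fun total e => total + (PySem.List.max? e (fun x => x)).getD 0) 0
      = (l.map (fun e => (PySem.List.max? e (fun x => x)).getD 0)).sum := by
    intro l; rw [List.sum_eq_foldl, List.foldl_map]
  rw [show (fun (big : List (List Int)) (i : Int) =>
        let t1 : List Int := match PySem.List.pyGet? xs i with
          | some v => [] ++ [v]
          | none => []
        let t2 : List Int := match PySem.List.pyGet? ys i with
          | some v => t1 ++ [v]
          | none => t1
        let t3 : List Int := match PySem.List.pyGet? zs i with
          | some v => t2 ++ [v]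
          | none => t2
        big ++ [t3]) = (fun big i => big ++ [cand3 xs ys zs i]) from rfl]
  rw [PySem.List.foldl_append_singleton_eq_map, List.nil_append, h2, List.map_map]
  rw [PySem.List.pyRange_zero_natCast, List.map_map]
  exact main3 (max xs.length (max ys.length zs.length)) xs ys zs rfl

-- ===== VERDICT (by name: the statement is the Claim_ definition above) =====
theorem sumOfLargest_spec : Claim_equal_sumOfLargest := by
  intro a1 a2 a3 _
  unfold Spec_sumOfLargest sumOfLargest sumOfLargest_alt
  exact key_lemma (pvParse a1) (pvParse a2) (pvParse a3)
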